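-- pv_equiv track=rewrite | github.com/hwon-n/Algorithm | programmers/budget.py | solution
-- ===== SOURCE A (Python) =====
-- def solution(d, budget):
--     answer = 0
--     d.sort()
--     for i in d:
--         if i > budget:
--             return answer
--         else:
--             budget -= i
--             answer += 1
--     return answer
-- ===== SOURCE B (Python) =====
-- def solution(d, budget):
--     d.sort()
--     # prefix sums
--     p = []
--     s = 0
--     for x in d:
--         s += x
--         p.append(s)
--     if not p or p[0] > budget:
--         return 0
--     # Because d is sorted, the prefix sums are convex (nondecreasing increments),
--     # so once p[0] <= budget the set {k : p[k-1] <= budget} is a prefix of 1..n: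
--     # binary search for the largest such k.
--     lo, hi = 1, len(p)
--     while lo < hi:
--         mid = (lo + hi + 1) // 2
--         if p[mid - 1] <= budget:
--             lo = mid
--         else:
--             hi = mid - 1
--     return lo
-- ===== Notes on version B (the rewrite author's own statement) =====
-- stated objective: alternative
-- what changed: Instead of A's greedy scan that subtracts each item from a shrinking budget until one no longer fits, B precomputes the prefix-sum array of the sorted list and binary-searches for the largest k whose k-th prefix sum fits in the budget (valid because sortedness makes the prefix sums convex, so the affordable counts form a prefix of 1..n).
import Mathlib
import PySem

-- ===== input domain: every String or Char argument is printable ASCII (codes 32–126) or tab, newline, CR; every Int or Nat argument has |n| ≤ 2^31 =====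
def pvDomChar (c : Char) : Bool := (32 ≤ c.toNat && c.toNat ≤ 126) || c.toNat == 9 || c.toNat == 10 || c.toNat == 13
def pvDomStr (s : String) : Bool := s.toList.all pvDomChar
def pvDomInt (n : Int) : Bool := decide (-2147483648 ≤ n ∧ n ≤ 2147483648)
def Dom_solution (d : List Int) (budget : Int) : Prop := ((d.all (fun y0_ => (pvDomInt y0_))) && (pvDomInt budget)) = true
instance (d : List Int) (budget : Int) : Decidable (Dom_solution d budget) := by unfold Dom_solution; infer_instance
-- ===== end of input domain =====

-- B replaces A's greedy shrinking-budget scan by prefix sums plus a binary search for the largest affordable count (valid because the sorted list makes prefix sums convex); same asymptotic cost. A sorts d in place; B performs the same mutation.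


-- ===== PORT A =====
-- A's loop: early return when the next (sorted) item exceeds the remaining budget
def solLoop : List Int → Int → Int → Int
  | [], _, answer => answer
  | i :: t, budget, answer =>
      if i > budget then answer else solLoop t (budget - i) (answer + 1)

def solution (d : List Int) (budget : Int) : Int :=
  solLoop (PySem.List.sorted d (fun x => x)) budget 0

-- ===== PORT B =====
-- B's first loop: running prefix sums (s += x; p.append(s))
def accFrom (s : Int) : List Int → List Int
  | [] => []
  | x :: t => (s + x) :: accFrom (s + x) t

-- B's while loop: binary search for the largest k in [lo,hi] with p[k-1] <= budget
-- (the index mid-1 is always in range there, so getD's default is never used)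
def pvBsearch (p : List Int) (budget : Int) (lo hi : Nat) : Nat :=
  if lo < hi then
    let mid := (lo + hi + 1) / 2
    if p.getD (mid - 1) 0 ≤ budget then pvBsearch p budget mid hi
    else pvBsearch p budget lo (mid - 1)
  else lo
termination_by hi - lo
decreasing_by all_goals omega

def solution_alt (d : List Int) (budget : Int) : Int :=
  let p := accFrom 0 (PySem.List.sorted d (fun x => x))
  if p = [] then 0
  else if p.getD 0 0 > budget then 0
  else (pvBsearch p budget 1 p.length : Int)

-- ===== PRECONDITION & SPEC =====
def Spec_solution (d : List Int) (budget : Int) (out : Int) : Prop := out = solution_alt d budget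
instance (d : List Int) (budget : Int) (out : Int) : Decidable (Spec_solution d budget out) := by unfold Spec_solution; infer_instance

-- ===== CLAIM (what is proved, stated in full; the proofs are below) =====
def Claim_equal_solution : Prop := ∀ (d : List Int) (budget : Int), Dom_solution d budget → Spec_solution d budget (solution d budget)

-- ===== LEMMAS AND PROOFS =====

-- A's loop counts how many prefix sums stay within the budget.
theorem solLoop_eq (l : List Int) : ∀ (s b ans : Int),
    solLoop l (b - s) ans = ans + ((accFrom s l).takeWhile (fun x => decide (x ≤ b))).length := by
  induction l with
  | nil => intro s b ans; simp [solLoop, accFrom]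
  | cons i t ih =>
      intro s b ans
      simp only [solLoop, accFrom, List.takeWhile]
      by_cases h : i > b - s
      · have : ¬ (s + i ≤ b) := by omega
        simp [h, this]
      · have hle : s + i ≤ b := by omega
        have heq : b - s - i = b - (s + i) := by ring
        simp [h, hle, heq, ih (s + i) b (ans + 1)]
        omega

theorem accFrom_length (l : List Int) : ∀ s : Int, (accFrom s l).length = l.length := by
  induction l with
  | nil => intro s; simp [accFrom]
  | cons x t ih => intro s; simp [accFrom, ih]

theorem accFrom_getD (l : List Int) : ∀ (s : Int) (k : Nat), k < l.length →
    (accFrom s l).getD k 0 = s + (l.take (k + 1)).sum := by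
  induction l with
  | nil => intro s k h; simp at h
  | cons x t ih =>
      intro s k h
      cases k with
      | zero => simp [accFrom]
      | succ k =>
          simp only [accFrom, List.getD_cons_succ, List.take_succ_cons, List.sum_cons]
          rw [ih (s + x) k (by simpa using h)]
          ring

-- elements strictly inside the takeWhile prefix satisfy the predicate
theorem takeWhile_getD_true (p : Int → Bool) (l : List Int) :
    ∀ k : Nat, k < (l.takeWhile p).length → p (l.getD k 0) = true := by
  induction l with
  | nil => intro k h; simp at h
  | cons x t ih =>
      intro k h
      by_cases hx : p x
      · cases k with
        | zero => simpa using hx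
        | succ k =>
            simp only [List.takeWhile_cons, hx, if_true, List.length_cons] at h
            exact ih k (by omega)
      · simp [hx] at h
-- the element just past the takeWhile prefix (if any) fails the predicate
theorem takeWhile_length_getD_false (p : Int → Bool) (l : List Int) :
    (l.takeWhile p).length < l.length → p (l.getD (l.takeWhile p).length 0) = false := by
  induction l with
  | nil => intro h; simp at h
  | cons x t ih =>
      intro h
      by_cases hx : p x
      · simp only [List.takeWhile_cons, hx, if_true, List.length_cons, List.getD_cons_succ]
        simp only [List.takeWhile_cons, hx, if_true, List.length_cons] at h
        exact ih (by omega)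
      · simp [hx]

-- consecutive prefix sums differ by the corresponding element
theorem accFrom_step (l : List Int) (k : Nat) (h1 : 1 ≤ k) (h2 : k < l.length) :
    (accFrom 0 l).getD k 0 = (accFrom 0 l).getD (k - 1) 0 + l.getD k 0 := by
  rw [accFrom_getD l 0 k h2, accFrom_getD l 0 (k - 1) (by omega)]
  have hk : k - 1 + 1 = k := by omega
  rw [hk, List.take_add_one]
  have hg : l[k]? = some (l.getD k 0) := by
    rw [List.getD_eq_getElem l 0 h2]
    exact List.getElem?_eq_getElem h2
  rw [hg]
  simp [List.sum_append]

-- binary search returns m when the valid counts are exactly 1..m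
theorem pvBsearch_eq (p : List Int) (b : Int) (m : Nat)
    (H1 : ∀ k : Nat, 1 ≤ k → k ≤ m → p.getD (k - 1) 0 ≤ b)
    (H2 : ∀ k : Nat, m < k → k ≤ p.length → b < p.getD (k - 1) 0) :
    ∀ lo hi : Nat, 1 ≤ lo → lo ≤ m → m ≤ hi → hi ≤ p.length →
    pvBsearch p b lo hi = m := by
  intro lo hi
  induction hn : hi - lo using Nat.strong_induction_on generalizing lo hi with
  | _ n ih =>
    intro h1 hlom hmhi hhin
    unfold pvBsearch
    by_cases hlt : lo < hi
    · simp only [hlt, if_true]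
      by_cases hc : p.getD ((lo + hi + 1) / 2 - 1) 0 ≤ b
      · simp only [hc, if_true]
        have hmid_le_m : (lo + hi + 1) / 2 ≤ m := by
          by_contra hcon
          exact absurd hc (not_le.mpr (H2 _ (by omega) (by omega)))
        exact ih (hi - (lo + hi + 1) / 2) (by omega) _ _ rfl (by omega) hmid_le_m hmhi hhin
      · simp only [hc, if_false]
        have hm_lt_mid : m < (lo + hi + 1) / 2 := by
          by_contra hcon
          exact hc (H1 _ (by omega) (by omega))
        exact ih ((lo + hi + 1) / 2 - 1 - lo) (by omega) _ _ rfl h1 hlom (by omega) (by omega)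
    · simp only [hlt, if_false]
      omega

-- convexity: past the first failing prefix sum of a sorted list, all of them exceed b
theorem past_first_failure (l : List Int) (b : Int) (m : Nat)
    (hm : m = ((accFrom 0 l).takeWhile (fun x => decide (x ≤ b))).length)
    (hsorted : ∀ p q : Nat, p ≤ q → q < l.length → l.getD p 0 ≤ l.getD q 0)
    (hm1 : 1 ≤ m) (hmn : m < l.length) :
    ∀ k : Nat, m < k → k ≤ l.length → b < (accFrom 0 l).getD (k - 1) 0 := by
  have hpl : (accFrom 0 l).length = l.length := accFrom_length l 0
  have htwle : ((accFrom 0 l).takeWhile (fun x => decide (x ≤ b))).length ≤ l.length := by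
    have := (List.takeWhile_prefix (p := fun x => decide (x ≤ b)) (l := accFrom 0 l)).length_le
    omega
  have hH1 : ∀ k : Nat, k < m → (accFrom 0 l).getD k 0 ≤ b := by
    intro k hk
    have := takeWhile_getD_true (fun x => decide (x ≤ b)) (accFrom 0 l) k (by omega)
    simpa using this
  have hfail : b < (accFrom 0 l).getD m 0 := by
    have := takeWhile_length_getD_false (fun x => decide (x ≤ b)) (accFrom 0 l) (by omega)
    rw [← hm] at this
    simpa using this
  -- the increment at index m is positive
  have hstep_m : (accFrom 0 l).getD m 0 = (accFrom 0 l).getD (m - 1) 0 + l.getD m 0 :=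
    accFrom_step l m hm1 hmn
  have hlm_pos : 0 < l.getD m 0 := by
    have := hH1 (m - 1) (by omega)
    omega
  -- all prefix sums at indices ≥ m exceed b, by induction on the index
  have main : ∀ j : Nat, m + j < l.length → b < (accFrom 0 l).getD (m + j) 0 := by
    intro j
    induction j with
    | zero => intro _; simpa using hfail
    | succ j ihj =>
        intro hj
        have hstep : (accFrom 0 l).getD (m + j + 1) 0 =
            (accFrom 0 l).getD (m + j) 0 + l.getD (m + j + 1) 0 := by
          have := accFrom_step l (m + j + 1) (by omega) (by omega)
          simpa using this
        have hlk : l.getD m 0 ≤ l.getD (m + j + 1) 0 := hsorted m (m + j + 1) (by omega) (by omega)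
        have := ihj (by omega)
        have heq : m + (j + 1) = m + j + 1 := by omega
        rw [heq, hstep]
        omega
  intro k hk hkn
  have := main (k - 1 - m) (by omega)
  have heq : m + (k - 1 - m) = k - 1 := by omega
  rwa [heq] at this

-- ===== VERDICT (by name: the statement is the Claim_ definition above) =====
theorem solution_spec : Claim_equal_solution := by
  intro d budget _
  unfold Spec_solution solution solution_alt
  set l := PySem.List.sorted d (fun x => x) with hl
  set acc := accFrom 0 l with hacc
  set m := (acc.takeWhile (fun x => decide (x ≤ budget))).length with hm
  have hA : solLoop l budget 0 = (m : Int) := by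
    have := solLoop_eq l 0 budget 0
    simpa using this
  have hlen : acc.length = l.length := accFrom_length l 0
  have htwle : m ≤ acc.length :=
    (List.takeWhile_prefix (p := fun x => decide (x ≤ budget)) (l := acc)).length_le
  by_cases hnil : acc = []
  · have hm0 : m = 0 := by simp [hm, hnil]
    rw [if_pos hnil, hA, hm0]
    rfl
  · rw [if_neg hnil]
    have hlpos : 0 < acc.length := List.length_pos_iff.mpr hnil
    by_cases hb0 : acc.getD 0 0 > budget
    · -- first prefix sum already exceeds the budget: m = 0
      have hm0 : m = 0 := by
        by_contra hne
        have := takeWhile_getD_true (fun x => decide (x ≤ budget)) acc 0 (by omega)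
        simp only [List.getD] at this hb0
        simp at this
        omega
      rw [if_pos hb0, hA, hm0]
      rfl
    · rw [if_neg hb0]
      -- first prefix sum fits: m ≥ 1, and the binary search finds m
      have hm1 : 1 ≤ m := by
        by_contra hne
        have := takeWhile_length_getD_false (fun x => decide (x ≤ budget)) acc (by omega)
        have hz : (acc.takeWhile (fun x => decide (x ≤ budget))).length = 0 := by omega
        rw [hz] at this
        simp only [List.getD] at this hb0
        simp at this
        omega
      have hsorted : ∀ p q : Nat, p ≤ q → q < l.length → l.getD p 0 ≤ l.getD q 0 := by
        intro p q hpq hq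
        rw [List.getD_eq_getElem l 0 (by omega), List.getD_eq_getElem l 0 hq]
        exact PySem.List.sorted_id_getElem_mono d hpq hq
      have hH1 : ∀ k : Nat, 1 ≤ k → k ≤ m → acc.getD (k - 1) 0 ≤ budget := by
        intro k hk1 hkm
        have := takeWhile_getD_true (fun x => decide (x ≤ budget)) acc (k - 1) (by omega)
        simpa using this
      have hH2 : ∀ k : Nat, m < k → k ≤ acc.length → budget < acc.getD (k - 1) 0 := by
        intro k hk hkn
        by_cases hmn : m < l.length
        · exact past_first_failure l budget m hm hsorted hm1 hmn k hk (by omega)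
        · omega
      rw [pvBsearch_eq acc budget m hH1 hH2 1 acc.length le_rfl hm1 htwle le_rfl, hA]
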